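-- pv_equiv track=rewrite | github.com/yonkow/python--fundamentals | ex4_functions/palindrome_integers.py | palindrome_integer
-- ===== SOURCE A (Python) =====
-- def palindrome_integer(lst_of_numbers):
--     palindrome_lst = []
--     for current_number in lst_of_numbers:
--         if current_number == current_number[::-1]:
--             palindrome_lst.append(True)
--         else:
--             palindrome_lst.append(False)
--     return palindrome_lst
-- ===== SOURCE B (Python) =====
-- def palindrome_integer(lst_of_numbers):
--     result = []
--     for x in lst_of_numbers:
--         n = len(x)
--         ok = True
--         for i in range(n // 2):
--             if x[i] != x[n - 1 - i]:
--                 ok = False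
--                 break
--         result.append(ok)
--     return result
-- ===== Notes on version B (the rewrite author's own statement) =====
-- stated objective: alternative
-- what changed: Instead of materialising the full reversed string and comparing whole strings, B runs a two-pointer half-scan per element, comparing x[i] with x[n-1-i] for i < n//2 and stopping at the first mismatch.
import Mathlib
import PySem

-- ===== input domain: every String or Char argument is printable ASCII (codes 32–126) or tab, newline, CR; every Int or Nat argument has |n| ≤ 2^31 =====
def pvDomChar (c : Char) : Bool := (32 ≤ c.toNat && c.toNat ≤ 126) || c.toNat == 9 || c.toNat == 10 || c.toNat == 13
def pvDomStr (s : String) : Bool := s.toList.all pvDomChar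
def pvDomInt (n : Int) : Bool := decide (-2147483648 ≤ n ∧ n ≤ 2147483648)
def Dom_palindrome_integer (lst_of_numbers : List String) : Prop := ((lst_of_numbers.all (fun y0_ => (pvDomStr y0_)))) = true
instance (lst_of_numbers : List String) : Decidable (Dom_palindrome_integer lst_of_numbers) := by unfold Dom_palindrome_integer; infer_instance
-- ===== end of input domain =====

-- B changes the per-element check: a two-pointer half-scan with early exit instead of
-- building the reversed string and comparing; same cost class (objective: alternative).

-- ===== PORT A =====
-- current_number == current_number[::-1]  (s[::-1] via PySem.Str.slice?, which is 'some' for step -1)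
def palindrome_integer (lst_of_numbers : List String) : List Bool :=
  lst_of_numbers.foldl
    (fun acc s => acc ++ [decide (some s = PySem.Str.slice? s none none (-1))]) []

-- ===== PORT B =====
-- inner loop 'for i in range(n // 2): if x[i] != x[n-1-i]: ok = False; break'
def pvHalf (cs : List Char) (i : Nat) : Bool :=
  if i < cs.length / 2 then
    if cs.getD i ' ' = cs.getD (cs.length - 1 - i) ' ' then pvHalf cs (i + 1)
    else false
  else true
termination_by cs.length / 2 - i

def palindrome_integer_alt (lst_of_numbers : List String) : List Bool :=
  lst_of_numbers.foldl (fun acc s => acc ++ [pvHalf s.toList 0]) []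

-- ===== PRECONDITION & SPEC =====
def Spec_palindrome_integer (lst_of_numbers : List String) (out : List Bool) : Prop := out = palindrome_integer_alt lst_of_numbers
instance (lst_of_numbers : List String) (out : List Bool) : Decidable (Spec_palindrome_integer lst_of_numbers out) := by unfold Spec_palindrome_integer; infer_instance

-- ===== CLAIM (what is proved, stated in full; the proofs are below) =====
def Claim_equal_palindrome_integer : Prop := ∀ (lst_of_numbers : List String), Dom_palindrome_integer lst_of_numbers → Spec_palindrome_integer lst_of_numbers (palindrome_integer lst_of_numbers)

-- ===== LEMMAS AND PROOFS =====

-- the half-scan as a logical condition on the remaining indices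
theorem pvHalf_eq (cs : List Char) (i : Nat) :
    pvHalf cs i =
      decide (∀ j, i ≤ j → j < cs.length / 2 →
        cs.getD j ' ' = cs.getD (cs.length - 1 - j) ' ') := by
  generalize hk : cs.length / 2 - i = k
  induction k generalizing i with
  | zero =>
    unfold pvHalf
    rw [if_neg (by omega)]
    symm; simp only [decide_eq_true_iff]
    intro j h1 h2; omega
  | succ k ih =>
    unfold pvHalf
    rw [if_pos (by omega)]
    by_cases h : cs.getD i ' ' = cs.getD (cs.length - 1 - i) ' '
    · rw [if_pos h, ih (i + 1) (by omega)]
      by_cases hall : ∀ j, i + 1 ≤ j → j < cs.length / 2 →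
          cs.getD j ' ' = cs.getD (cs.length - 1 - j) ' '
      · rw [decide_eq_true hall, decide_eq_true]
        intro j h1 h2
        rcases Nat.eq_or_lt_of_le h1 with rfl | h1'
        · exact h
        · exact hall j h1' h2
      · rw [decide_eq_false hall, decide_eq_false]
        intro hall'; exact hall fun j h1 h2 => hall' j (by omega) h2
    · rw [if_neg h]
      symm; rw [decide_eq_false]
      intro hall'; exact h (hall' i le_rfl (by omega))

-- the half condition characterises palindromes
theorem half_iff_palindrome (cs : List Char) :
    (∀ j, 0 ≤ j → j < cs.length / 2 →
      cs.getD j ' ' = cs.getD (cs.length - 1 - j) ' ') ↔ cs = cs.reverse := by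
  constructor
  · intro h
    apply List.ext_getElem (by simp)
    intro j hj hj'
    rw [List.getElem_reverse]
    by_cases hlt : j < cs.length / 2
    · have := h j (Nat.zero_le _) hlt
      simpa [List.getD_eq_getElem?_getD, List.getElem?_eq_getElem, hj,
        show cs.length - 1 - j < cs.length by omega] using this
    · by_cases hmid : j = cs.length - 1 - j
      · apply Option.some.inj
        rw [← List.getElem?_eq_getElem, ← List.getElem?_eq_getElem, ← hmid]
      · have hk : cs.length - 1 - j < cs.length / 2 := by omega
        have := (h _ (Nat.zero_le _) hk).symm
        have hj2 : cs.length - 1 - (cs.length - 1 - j) = j := by omega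
        rw [hj2] at this
        simpa [List.getD_eq_getElem?_getD, List.getElem?_eq_getElem, hj,
          show cs.length - 1 - j < cs.length by omega] using this
  · intro h j _ hj
    conv_lhs => rw [h]
    have hjl : j < cs.length := by omega
    rw [List.getD_eq_getElem?_getD, List.getD_eq_getElem?_getD,
      List.getElem?_eq_getElem (by simpa using hjl),
      List.getElem?_eq_getElem (show cs.length - 1 - j < cs.length by omega),
      List.getElem_reverse]

-- per-element agreement
theorem elem_agree (s : String) :
    decide (some s = PySem.Str.slice? s none none (-1)) = pvHalf s.toList 0 := by
  rw [PySem.Str.slice?_none_none_neg_one, pvHalf_eq]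
  have key : (∀ j, 0 ≤ j → j < s.toList.length / 2 →
      s.toList.getD j ' ' = s.toList.getD (s.toList.length - 1 - j) ' ') ↔
      s = String.ofList s.toList.reverse := by
    rw [half_iff_palindrome]
    constructor
    · intro h; apply String.toList_injective; simpa using h
    · intro h; conv_lhs => rw [h]
      simp
  by_cases h : s = String.ofList s.toList.reverse
  · rw [decide_eq_true (congrArg some h), decide_eq_true (key.mpr h)]
  · rw [decide_eq_false (by simpa using h), decide_eq_false (fun hh => h (key.mp hh))]

-- ===== VERDICT (by name: the statement is the Claim_ definition above) =====
theorem palindrome_integer_spec : Claim_equal_palindrome_integer := by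
  intro lst _
  unfold Spec_palindrome_integer palindrome_integer palindrome_integer_alt
  rw [PySem.List.foldl_append_singleton_eq_map, PySem.List.foldl_append_singleton_eq_map]
  exact List.map_congr_left fun s _ => elem_agree s
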